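-- pv_equiv track=rewrite | github.com/ah9mon/AlgorithmStudy | sungu/programmers_5week/5_1.py | solution
-- ===== SOURCE A (Python) =====
-- def solution(k, m, score):
--     answer = 0
--     score.sort(reverse=True)  #내림차순 정렬
--     cnt = 0
--     arr = []  #사과들을 담을 상자
--     for i in range(len(score)):
--         arr.append(score[i])
--         cnt += 1
--         if cnt % m == 0:  #상자가 가득 찼다면
--             value = (min(arr)) * m#상자에 담긴 사과들 중 가장 값 싼 사과 * m
--             answer += value #answer에 더해줌
--             arr = []  #새로운 상자로 초기화
--     return answer
-- ===== SOURCE B (Python) =====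
-- def solution(k, m, score):
--     # same in-place descending sort side effect as A
--     score.sort(reverse=True)
--     answer = 0
--     for i in range(m - 1, len(score), m):
--         answer += score[i]
--     return answer * m
-- ===== Notes on version B (the rewrite author's own statement) =====
-- stated objective: faster
-- what changed: Instead of accumulating each box in a list and calling min on it, B uses that after the descending sort the minimum of every full box is its last element, so it strides directly over indices m-1, 2m-1, ... keeping only a running total; the post-sort work drops from O(n) list appends plus min scans to an O(n/m) strided sum.
-- outside the precondition, e.g. on solution(0, -2, [3, 1]): A returns -2, B returns 0; on solution(0, 0, [1]): A raises ZeroDivisionError, B raises ValueError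
import Mathlib
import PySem

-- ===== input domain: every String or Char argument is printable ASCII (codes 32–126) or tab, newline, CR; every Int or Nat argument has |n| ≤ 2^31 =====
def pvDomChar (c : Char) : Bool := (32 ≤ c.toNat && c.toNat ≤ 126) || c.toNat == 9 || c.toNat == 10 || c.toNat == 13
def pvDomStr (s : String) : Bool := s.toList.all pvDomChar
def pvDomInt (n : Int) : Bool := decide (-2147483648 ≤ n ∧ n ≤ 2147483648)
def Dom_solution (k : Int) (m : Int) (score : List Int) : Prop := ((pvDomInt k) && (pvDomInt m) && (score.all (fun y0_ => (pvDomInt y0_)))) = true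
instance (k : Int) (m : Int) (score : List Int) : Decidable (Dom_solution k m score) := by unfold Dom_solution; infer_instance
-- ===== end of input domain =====

-- B replaces A's per-box list accumulation + min() by a direct strided sum of each full box's
-- last (hence smallest) element after the descending sort, dropping the per-box list building and
-- min() scans (objective: faster, measured).
-- Python A and B both sort `score` in place; the equivalence proved here is about the return value.

-- ===== PORT A =====
-- one loop step of A: append score[i] to the box, bump cnt, close the box when cnt % m == 0
def solStepA (m : Int) (st : Int × Int × List Int) (x : Int) : Int × Int × List Int :=
  let arr := st.2.2 ++ [x]
  let cnt := st.2.1 + 1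
  if PySem.Int.mod cnt m == 0 then
    -- arr is nonempty whenever this branch runs, so Python's min() cannot raise; getD 0 is unreachable
    (st.1 + ((PySem.List.min? arr (fun z => z)).getD 0) * m, cnt, [])
  else
    (st.1, cnt, arr)

def solution (k : Int) (m : Int) (score : List Int) : Int :=
  ((PySem.List.pyRange 0 ((PySem.List.sorted score (fun x => x) true).length : Int) 1).foldl
      (fun st i => solStepA m st (PySem.List.pyGetD (PySem.List.sorted score (fun x => x) true) i 0))
      (0, 0, [])).1

-- ===== PORT B =====
def solution_alt (k : Int) (m : Int) (score : List Int) : Int :=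
  ((PySem.List.pyRange (m - 1) ((PySem.List.sorted score (fun x => x) true).length : Int) m).foldl
      (fun acc i => acc + PySem.List.pyGetD (PySem.List.sorted score (fun x => x) true) i 0) 0) * m

-- ===== PRECONDITION & SPEC =====
-- Pre_ excludes m = 0, where both A and B raise (ZeroDivisionError resp. ValueError), and the inputs
-- with m < 0 and at least |m| scores: a "box" of negative size is meaningless and there A's value
-- (box minima times a negative m, driven by cnt % m with a negative divisor) is an accidental
-- artefact — a corner nobody would specify either way. (For m < 0 with fewer than |m| scores both
-- programs return 0 and that IS claimed.)
def Pre_solution (k : Int) (m : Int) (score : List Int) : Prop :=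
  1 ≤ m ∨ (score.length : Int) < -m
instance (k : Int) (m : Int) (score : List Int) : Decidable (Pre_solution k m score) := by unfold Pre_solution; infer_instance
def pvWitness_solution : Int × Int × List Int := (4, 3, [1, 2, 3, 1, 2, 3, 1])
def Spec_solution (k : Int) (m : Int) (score : List Int) (out : Int) : Prop := out = solution_alt k m score
instance (k : Int) (m : Int) (score : List Int) (out : Int) : Decidable (Spec_solution k m score out) := by unfold Spec_solution; infer_instance

-- ===== CLAIM (what is proved, stated in full; the proofs are below) =====
def Claim_equal_solution : Prop := ∀ (k : Int) (m : Int) (score : List Int), Dom_solution k m score → Pre_solution k m score → Spec_solution k m score (solution k m score)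

-- ===== LEMMAS AND PROOFS =====

-- common specification of both loops: sum of the elements at indices r-1, r-1+mn, r-1+2mn, …
def strideSum (mn : Nat) (s : List Int) (r : Nat) : Int :=
  if h : 0 < r ∧ r ≤ s.length then
    s.getD (r - 1) 0 + strideSum mn (s.drop r) mn
  else 0
termination_by s.length
decreasing_by simp [List.length_drop]; omega

lemma strideSum_nil (mn r : Nat) : strideSum mn [] r = 0 := by
  rw [strideSum, dif_neg (by rintro ⟨h1, h2⟩; simp at h2; omega)]

lemma strideSum_of_gt (mn r : Nat) (s : List Int) (h : s.length < r) : strideSum mn s r = 0 := by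
  rw [strideSum, dif_neg (by omega)]

lemma strideSum_cons_one (mn : Nat) (x : Int) (t : List Int) :
    strideSum mn (x :: t) 1 = x + strideSum mn t mn := by
  rw [strideSum]; simp

lemma strideSum_cons (mn r : Nat) (x : Int) (t : List Int) (hr : 2 ≤ r) :
    strideSum mn (x :: t) r = strideSum mn t (r - 1) := by
  by_cases h : r ≤ t.length + 1
  · conv_lhs => rw [strideSum]
    conv_rhs => rw [strideSum]
    rw [dif_pos (by simp; omega), dif_pos (by omega)]
    have hdrop : (x :: t).drop r = t.drop (r - 1) := by
      cases r with
      | zero => omega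
      | succ n => simp
    have hget : (x :: t).getD (r - 1) 0 = t.getD (r - 1 - 1) 0 := by
      cases r with
      | zero => omega
      | succ n => cases n with
        | zero => omega
        | succ p => simp
    rw [hdrop, hget]
  · rw [strideSum_of_gt mn r (x :: t) (by simp; omega),
        strideSum_of_gt mn (r - 1) t (by omega)]

-- min of a nonempty list all of whose elements are ≥ its last element x is x
lemma min_append_last (arr : List Int) (x : Int)
    (h : ∀ a ∈ arr, x ≤ a) :
    (PySem.List.min? (arr ++ [x]) (fun z => z)).getD 0 = x := by
  obtain ⟨mv, hmv⟩ : ∃ mv, PySem.List.min? (arr ++ [x]) (fun z => z) = some mv := by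
    cases hm : PySem.List.min? (arr ++ [x]) (fun z => z) with
    | none => exact absurd ((PySem.List.min?_eq_none_iff _ _).mp hm) (by simp)
    | some v => exact ⟨v, rfl⟩
  have hmem := PySem.List.min?_mem hmv
  have hmin := PySem.List.min?_isMin hmv
  have h1 : mv ≤ x := hmin x (by simp)
  have h2 : x ≤ mv := by
    rcases List.mem_append.mp hmem with h' | h'
    · exact h mv h'
    · simp at h'; omega
  rw [hmv]; simp; omega

-- A's loop invariant: from a state whose box already holds arr.length elements (cnt % m = arr.length),
-- all of them ≥ everything still to come, the loop adds m * strideSum of the remaining descending list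
lemma loopA_eq (m : Int) (hm : 1 ≤ m) :
    ∀ (s arr : List Int) (cnt ans : Int),
      0 ≤ cnt →
      PySem.Int.mod cnt m = (arr.length : Int) →
      (arr.length : Int) < m →
      (∀ a ∈ arr, ∀ y ∈ s, y ≤ a) →
      s.Pairwise (fun a b => b ≤ a) →
      (s.foldl (solStepA m) (ans, cnt, arr)).1
        = ans + m * strideSum m.toNat s (m.toNat - arr.length) := by
  intro s
  induction s with
  | nil =>
    intro arr cnt ans _ _ hlt _ _
    rw [strideSum_nil]; simp
  | cons x t ih =>
    intro arr cnt ans hc hmod hlt hge hpw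
    have hmpos : (0:Int) < m := by omega
    have hmodc : PySem.Int.mod cnt m = cnt % m := PySem.Int.mod_eq_emod_of_pos hmpos
    have hmodc1 : PySem.Int.mod (cnt + 1) m = (cnt + 1) % m := PySem.Int.mod_eq_emod_of_pos hmpos
    have hcm : cnt % m = (arr.length : Int) := by rw [← hmodc]; exact hmod
    have hsplit : cnt + 1 = ((cnt % m) + 1) + m * (cnt / m) := by
      have := Int.ediv_add_emod cnt m; omega
    have hstep : (cnt + 1) % m = ((arr.length : Int) + 1) % m := by
      rw [hsplit, Int.add_mul_emod_self_left, hcm]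
    simp only [List.foldl_cons]
    by_cases hfull : (arr.length : Int) + 1 = m
    · -- the box closes: cnt+1 ≡ 0 (mod m)
      have hz : (PySem.Int.mod (cnt + 1) m == 0) = true := by
        rw [hmodc1, hstep, hfull]; simp
      simp only [solStepA, hz, if_true]
      have hminv : (PySem.List.min? (arr ++ [x]) (fun z => z)).getD 0 = x :=
        min_append_last arr x (fun a ha => hge a ha x (by simp))
      rw [hminv]
      have hr : m.toNat - arr.length = 1 := by omega
      rw [hr, strideSum_cons_one]
      rw [ih [] (cnt + 1) (ans + x * m) (by omega)
            (by rw [hmodc1, hstep, hfull]; simp)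
            (by simp; omega)
            (by simp)
            (List.Pairwise.of_cons hpw)]
      simp
      ring
    · -- box not full yet
      have hlt1 : ((arr.length : Int) + 1) % m = (arr.length : Int) + 1 :=
        Int.emod_eq_of_lt (by omega) (by omega)
      have hnz : (PySem.Int.mod (cnt + 1) m == 0) = false := by
        rw [hmodc1, hstep, hlt1]; simp; omega
      simp only [solStepA, hnz, Bool.false_eq_true, if_false]
      have hge' : ∀ a ∈ arr ++ [x], ∀ y ∈ t, y ≤ a := by
        intro a ha y hy
        rcases List.mem_append.mp ha with h' | h'
        · exact hge a h' y (List.mem_cons_of_mem x hy)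
        · simp at h'; subst h'
          exact (List.pairwise_cons.mp hpw).1 y hy
      rw [ih (arr ++ [x]) (cnt + 1) ans (by omega)
            (by rw [hmodc1, hstep, hlt1]; push_cast [List.length_append, List.length_cons, List.length_nil]; omega)
            (by simp; omega)
            hge'
            (List.Pairwise.of_cons hpw)]
      congr 2
      have hlen : m.toNat - (arr ++ [x]).length = m.toNat - arr.length - 1 := by simp; omega
      rw [hlen, strideSum_cons m.toNat (m.toNat - arr.length) x t (by omega)]

-- pyRange with positive step: nil / cons / shift forms
lemma pyRange_pos_nil (a b st : Int) (hst : 0 < st) (h : b ≤ a) :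
    PySem.List.pyRange a b st = [] := by
  rw [PySem.List.pyRange_of_pos a b hst, if_neg (by omega)]
  simp

lemma pyRange_pos_cons (a b st : Int) (hst : 0 < st) (h : a < b) :
    PySem.List.pyRange a b st = a :: PySem.List.pyRange (a + st) b st := by
  rw [PySem.List.pyRange_of_pos a b hst, PySem.List.pyRange_of_pos (a + st) b hst,
      if_pos h]
  have hkey : (b - a + st - 1) / st = (if a + st < b then (b - (a + st) + st - 1) / st else 0) + 1 := by
    by_cases h2 : a + st < b
    · rw [if_pos h2]
      have : b - a + st - 1 = (b - (a + st) + st - 1) + 1 * st := by ring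
      rw [this, Int.add_mul_ediv_right _ _ (by omega)]
    · rw [if_neg h2]
      have h3 : 0 ≤ b - a - 1 := by omega
      have h4 : b - a - 1 < st := by omega
      have : b - a + st - 1 = (b - a - 1) + 1 * st := by ring
      rw [this, Int.add_mul_ediv_right _ _ (by omega), Int.ediv_eq_zero_of_lt h3 h4]
  rw [hkey]
  have htn : ((if a + st < b then (b - (a + st) + st - 1) / st else 0) + 1).toNat
      = (if a + st < b then (b - (a + st) + st - 1) / st else 0).toNat + 1 := by
    have : 0 ≤ (if a + st < b then (b - (a + st) + st - 1) / st else 0) := by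
      split
      · apply Int.ediv_nonneg <;> omega
      · omega
    omega
  rw [htn, apply_ite Int.toNat, List.range_succ_eq_map]
  simp only [List.map_cons, List.map_map, Int.toNat_zero]
  refine List.cons_eq_cons.mpr ⟨by simp, ?_⟩
  apply List.map_congr_left
  intro kk _
  simp only [Function.comp_apply]
  push_cast
  ring

lemma pyRange_pos_shift (a b st : Int) (hst : 0 < st) :
    PySem.List.pyRange (a + st) (b + st) st = (PySem.List.pyRange a b st).map (· + st) := by
  rw [PySem.List.pyRange_of_pos a b hst, PySem.List.pyRange_of_pos (a + st) (b + st) hst]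
  have : (b + st - (a + st) + st - 1) = (b - a + st - 1) := by ring
  rw [this]
  simp only [add_lt_add_iff_right]
  rw [List.map_map]
  apply List.map_congr_left
  intro k _
  simp [Function.comp]
  ring

-- pyGetD through drop
lemma pyGetD_drop (s : List Int) (kk : Nat) (i : Int) (hi : 0 ≤ i)
    (h : i < (s.length : Int) - kk) :
    PySem.List.pyGetD s (i + kk) 0 = PySem.List.pyGetD (s.drop kk) i 0 := by
  have hk : kk ≤ s.length := by omega
  rw [PySem.List.pyGetD_eq_getElem s 0 (by omega) (by omega),
      PySem.List.pyGetD_eq_getElem (s.drop kk) 0 hi (by simp; omega)]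
  have h1 : (i + kk).toNat = kk + i.toNat := by omega
  rw [List.getElem_drop]
  simp only [h1]

-- B's strided fold computes strideSum
lemma loopB_eq (m : Int) (hm : 1 ≤ m) :
    ∀ (n : Nat) (s : List Int), s.length = n → ∀ (acc : Int),
      (PySem.List.pyRange (m - 1) (s.length : Int) m).foldl
          (fun acc i => acc + PySem.List.pyGetD s i 0) acc
        = acc + strideSum m.toNat s m.toNat := by
  intro n
  induction n using Nat.strong_induction_on with
  | _ n ih =>
    intro s hs acc
    have hmpos : (0:Int) < m := by omega
    by_cases hsmall : (s.length : Int) ≤ m - 1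
    · rw [pyRange_pos_nil _ _ _ hmpos hsmall]
      rw [strideSum_of_gt _ _ _ (by omega)]
      simp
    · have hlt : m - 1 < (s.length : Int) := by omega
      rw [pyRange_pos_cons _ _ _ hmpos hlt]
      simp only [List.foldl_cons]
      have hshift : PySem.List.pyRange (m - 1 + m) (s.length : Int) m
          = (PySem.List.pyRange (m - 1) ((s.length : Int) - m) m).map (· + m) := by
        have h2 := pyRange_pos_shift (m - 1) ((s.length : Int) - m) m hmpos
        rw [show (s.length : Int) - m + m = (s.length : Int) by ring] at h2
        exact h2
      rw [hshift, List.foldl_map]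
      rw [PySem.List.foldl_congr_mem _ _
            (fun acc i => acc + PySem.List.pyGetD (s.drop m.toNat) i 0) _
            (by
              intro a i hi
              rw [PySem.List.mem_pyRange_iff_of_pos hmpos] at hi
              have : PySem.List.pyGetD s (i + m) 0
                  = PySem.List.pyGetD (s.drop m.toNat) i 0 := by
                have hmt : (m.toNat : Int) = m := by omega
                rw [← hmt]
                exact pyGetD_drop s m.toNat i (by omega) (by omega)
              rw [this])]
      have hdl : ((s.drop m.toNat).length : Int) = (s.length : Int) - m := by
        simp; omega
      rw [← hdl]
      rw [ih (s.drop m.toNat).length (by simp; omega) (s.drop m.toNat) rfl]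
      have hget : PySem.List.pyGetD s (m - 1) 0 = s.getD (m.toNat - 1) 0 := by
        have hidx : (m - 1).toNat = m.toNat - 1 := by omega
        rw [PySem.List.pyGetD_eq_getElem s 0 (by omega) (by omega),
            List.getD_eq_getElem s 0 (by omega)]
        simp only [hidx]
      conv_rhs => rw [strideSum, dif_pos (by constructor <;> omega)]
      rw [hget]
      ring

-- pyRange with negative step and start ≤ stop is empty
lemma pyRange_neg_nil (a b st : Int) (hst : st < 0) (h : a ≤ b) :
    PySem.List.pyRange a b st = [] := by
  simp only [PySem.List.pyRange, if_neg (by omega : ¬ st = 0)]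
  rw [if_neg (by omega : ¬ 0 < st), if_neg (by omega : ¬ b < a)]
  simp

-- for m < 0 the box-closing test cnt % m == 0 never fires while fewer than |m| items were seen
lemma loopA_neg (m : Int) (hm : m < 0) :
    ∀ (s arr : List Int) (cnt ans : Int), 0 ≤ cnt → cnt + s.length < -m →
      (s.foldl (solStepA m) (ans, cnt, arr)).1 = ans := by
  intro s
  induction s with
  | nil => intro arr cnt ans _ _; simp
  | cons x t ih =>
    intro arr cnt ans hc hlen
    have hne : ¬ PySem.Int.mod (cnt + 1) m = 0 := by
      rw [PySem.Int.mod_eq_zero_iff_dvd]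
      intro hdvd
      have h2 : (-m) ∣ (cnt + 1) := (neg_dvd).mpr hdvd
      have h3 := Int.le_of_dvd (by omega) h2
      simp only [List.length_cons] at hlen
      omega
    have hnz : (PySem.Int.mod (cnt + 1) m == 0) = false := by
      simp [hne]
    simp only [List.foldl_cons, solStepA, hnz, Bool.false_eq_true, if_false]
    apply ih (arr ++ [x]) (cnt + 1) ans (by omega)
    simp only [List.length_cons] at hlen
    omega

theorem solution_spec : Claim_equal_solution := by
  intro k m score _ hpre
  unfold Spec_solution solution solution_alt
  rcases hpre with hm | hneg
  · -- 1 ≤ m: both loops compute strideSum over the descending sort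
    rw [PySem.List.foldl_pyRange_zero_pyGetD' (PySem.List.sorted score (fun x => x) true)
          0 (solStepA m) ((0 : Int), (0 : Int), ([] : List Int))]
    rw [loopA_eq m hm (PySem.List.sorted score (fun x => x) true) [] 0 0 le_rfl
          (by rw [PySem.Int.mod_eq_emod_of_pos (by omega)]; simp)
          (by simp; omega)
          (by simp)
          (PySem.List.sorted_pairwise_rev score (fun x => x))]
    rw [loopB_eq m hm (PySem.List.sorted score (fun x => x) true).length _ rfl 0]
    simp [mul_comm]
  · -- fewer than |m| scores and m < 0: both sides are 0
    have hm0 : m < 0 := by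
      have : (0:Int) ≤ (score.length : Int) := by positivity
      omega
    rw [PySem.List.foldl_pyRange_zero_pyGetD' (PySem.List.sorted score (fun x => x) true)
          0 (solStepA m) ((0 : Int), (0 : Int), ([] : List Int))]
    rw [loopA_neg m hm0 _ [] 0 0 le_rfl (by simp at hneg ⊢; omega)]
    rw [pyRange_neg_nil _ _ _ hm0
          (by have : (0:Int) ≤ ((PySem.List.sorted score (fun x => x) true).length : Int) := by
                positivity
              omega)]
    simp
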